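-- pv_equiv track=rewrite | github.com/WayneCrawford/tiskitpy | tiskitpy/utils/clean_sequence.py | _min_codes
-- ===== SOURCE A (Python) =====
-- def _min_codes(codes):
--     """
--     Return minimum unique back-loaded string for each code
--     If there are two identical codes, returns the same value for each
--
--     Examples:
--         >>> CleanSequence._min_codes(['BHZ', 'BH1', 'BH2', 'BDH'])
--         ['Z', '1', '2', 'H']
--         >>> CleanSequence._min_codes(['BHZ', 'BH1', 'BH2', 'BLZ'])
--         ['HZ', '1', '2', 'LZ']
--         >>> CleanSequence._min_codes(['BHZ', 'BH1', 'BH2', 'BHZ'])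
--         ['Z', '1', '2', 'Z']
--     """
--     min_codes = []
--     for code in codes:
--         offset = 1
--         other_codes = [x for x in codes if not x == code]
--         while (code[-offset:]) in [x[-offset:] for x in other_codes]:
--             offset += 1
--             if offset > len(code):  # Don't run beyond length of code str
--                 offset = len(code)
--                 break
--         min_codes.append(code[-offset:])
--     return min_codes
-- ===== SOURCE B (Python) =====
-- def _lcp(a, b):
--     n = min(len(a), len(b))
--     i = 0
--     while i < n and a[i] == b[i]:
--         i += 1
--     return i
--
-- def _min_codes(codes):
--     rev = [c[::-1] for c in codes]
--     out = []
--     for r in rev: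
--         m = 0
--         for s in rev:
--             if s != r:
--                 p = _lcp(r, s)
--                 if p > m:
--                     m = p
--         k = min(m + 1, len(r))
--         out.append(r[:k][::-1])
--     return out
-- ===== Notes on version B (the rewrite author's own statement) =====
-- stated objective: alternative
-- what changed: B reverses all codes once and computes each result in closed form as one-plus-the-maximum longest-common-prefix with the other distinct reversed codes (capped at the code length), instead of A's while loop that rebuilds and searches a fresh list of length-offset suffix slices at every offset.
import Mathlib
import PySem

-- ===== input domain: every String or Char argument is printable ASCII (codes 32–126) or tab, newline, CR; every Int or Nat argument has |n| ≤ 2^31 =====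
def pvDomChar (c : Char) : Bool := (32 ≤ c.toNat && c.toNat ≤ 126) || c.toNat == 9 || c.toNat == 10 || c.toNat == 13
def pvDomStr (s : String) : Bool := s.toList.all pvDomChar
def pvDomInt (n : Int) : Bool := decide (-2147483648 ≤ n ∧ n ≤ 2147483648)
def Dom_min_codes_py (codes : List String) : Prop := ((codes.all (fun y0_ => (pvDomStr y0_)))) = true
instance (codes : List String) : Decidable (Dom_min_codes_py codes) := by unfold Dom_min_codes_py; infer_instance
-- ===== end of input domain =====

-- B replaces A's per-offset suffix-list rebuild-and-search loop by a closed form over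
-- reversed codes (offset = 1 + max common prefix with other distinct reversed codes); objective: alternative algorithm.

-- ===== PORT A =====
-- code[-off:] for off ≥ 1 (A only evaluates slices with offset ≥ 1): the last min(off, len) characters; exact there.
def pySuffix (l : List Char) (off : Nat) : List Char := l.drop (l.length - off)

-- A's while loop: condition, then offset += 1; if offset > len(code): offset = len(code); break.
def aLoop (c : List Char) (others : List (List Char)) (offset : Nat) (fuel : Nat) : Nat :=
  match fuel with
  | 0 => offset
  | fuel + 1 =>
    if pySuffix c offset ∈ others.map (fun x => pySuffix x offset) then
      if offset + 1 > c.length then c.length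
      else aLoop c others (offset + 1) fuel
    else offset

def min_codes_py (codes : List String) : List String :=
  let cs := codes.map String.toList
  cs.map (fun c =>
    let others := cs.filter (fun x => !(x == c))
    String.mk (pySuffix c (aLoop c others 1 (c.length + 1))))

-- ===== PORT B =====
-- Source B's _lcp while loop as structural recursion.
def lcpL : List Char → List Char → Nat
  | a :: as, b :: bs => if a = b then lcpL as bs + 1 else 0
  | _, _ => 0

def min_codes_py_alt (codes : List String) : List String :=
  let rev := codes.map (fun c => c.toList.reverse)
  rev.map (fun r =>
    let m := rev.foldl (fun m s => if s ≠ r then (if lcpL r s > m then lcpL r s else m) else m) 0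
    String.mk ((r.take (min (m + 1) r.length)).reverse))

-- ===== PRECONDITION & SPEC =====
def Spec_min_codes_py (codes : List String) (out : List String) : Prop := out = min_codes_py_alt codes
instance (codes : List String) (out : List String) : Decidable (Spec_min_codes_py codes out) := by unfold Spec_min_codes_py; infer_instance

-- ===== CLAIM (what is proved, stated in full; the proofs are below) =====
def Claim_equal_min_codes_py : Prop := ∀ (codes : List String), Dom_min_codes_py codes → Spec_min_codes_py codes (min_codes_py codes)

-- ===== LEMMAS AND PROOFS =====

theorem lcpL_le_left (a b : List Char) : lcpL a b ≤ a.length := by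
  induction a generalizing b with
  | nil => cases b <;> simp [lcpL]
  | cons x xs ih =>
    cases b with
    | nil => simp [lcpL]
    | cons y ys =>
      simp only [lcpL, List.length_cons]
      split
      · exact Nat.succ_le_succ (ih ys)
      · omega

theorem lcpL_cons_eq (x : Char) (xs ys : List Char) : lcpL (x :: xs) (x :: ys) = lcpL xs ys + 1 := by
  simp [lcpL]

theorem lcpL_cons_ne (x y : Char) (xs ys : List Char) (h : x ≠ y) : lcpL (x :: xs) (y :: ys) = 0 := by
  simp [lcpL, h]

theorem take_eq_iff_lcpL (a b : List Char) (k : Nat) :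
    a.take k = b.take k ↔ k ≤ lcpL a b ∨ a = b := by
  induction a generalizing b k with
  | nil =>
    cases b with
    | nil => simp
    | cons y ys =>
      cases k with
      | zero => simp
      | succ k => simp [lcpL]
  | cons x xs ih =>
    cases b with
    | nil =>
      cases k with
      | zero => simp [lcpL]
      | succ k => simp [lcpL]
    | cons y ys =>
      cases k with
      | zero => simp
      | succ k =>
        by_cases hxy : x = y
        · subst hxy
          rw [lcpL_cons_eq]
          simp only [List.take_succ_cons, List.cons.injEq, true_and]
          rw [ih ys k]
          exact or_congr (by omega) Iff.rfl
        · rw [lcpL_cons_ne x y xs ys hxy]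
          simp [List.take_succ_cons, hxy]

theorem take_lcpL_eq (a b : List Char) (k : Nat) (h : k ≤ lcpL a b) :
    a.take k = b.take k := (take_eq_iff_lcpL a b k).2 (Or.inl h)

theorem pySuffix_eq_rev (c : List Char) (off : Nat) :
    pySuffix c off = (c.reverse.take off).reverse := by
  unfold pySuffix
  rw [List.take_reverse]
  simp

theorem lcpL_comm (a b : List Char) : lcpL a b = lcpL b a := by
  induction a generalizing b with
  | nil => cases b <;> simp [lcpL]
  | cons x xs ih =>
    cases b with
    | nil => simp [lcpL]
    | cons y ys =>
      simp only [lcpL]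
      by_cases h : x = y
      · subst h; simp [ih]
      · simp [Ne.symm h, fun hh => h (hh : x = y)]

-- A's while condition ↔ ∃ other distinct code with common reversed prefix ≥ off
theorem cond_iff (cs : List (List Char)) (c : List Char) (off : Nat) :
    (pySuffix c off ∈ (cs.filter (fun x => !(x == c))).map (fun x => pySuffix x off)) ↔
    ∃ y ∈ cs, y ≠ c ∧ off ≤ lcpL c.reverse y.reverse := by
  simp only [List.mem_map, List.mem_filter, Bool.not_eq_true', beq_eq_false_iff_ne]
  constructor
  · rintro ⟨y, ⟨hy, hne⟩, heq⟩
    refine ⟨y, hy, hne, ?_⟩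
    have h : y.reverse.take off = c.reverse.take off := by
      have := heq
      rw [pySuffix_eq_rev, pySuffix_eq_rev] at this
      exact List.reverse_injective this
    rcases (take_eq_iff_lcpL y.reverse c.reverse off).1 h with h2 | h2
    · rw [lcpL_comm]; exact h2
    · exact absurd (List.reverse_injective h2) hne
  · rintro ⟨y, hy, hne, hle⟩
    refine ⟨y, ⟨hy, hne⟩, ?_⟩
    rw [pySuffix_eq_rev, pySuffix_eq_rev]
    congr 1
    exact take_lcpL_eq _ _ _ (by rw [lcpL_comm] at hle; exact hle)

-- fold in B computes the maximum lcp with distinct others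
theorem fold_char (r : List Char) (l : List (List Char)) (acc off : Nat) :
    off ≤ l.foldl (fun m s => if s ≠ r then (if lcpL r s > m then lcpL r s else m) else m) acc ↔
    off ≤ acc ∨ ∃ s ∈ l, s ≠ r ∧ off ≤ lcpL r s := by
  induction l generalizing acc with
  | nil => simp
  | cons s l ih =>
    simp only [List.foldl_cons, ih, List.mem_cons]
    by_cases hs : s = r
    · subst hs
      rw [if_neg (fun h => h rfl)]
      constructor
      · rintro (h | ⟨t, ht, h1, h2⟩)
        · exact Or.inl h
        · exact Or.inr ⟨t, Or.inr ht, h1, h2⟩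
      · rintro (h | ⟨t, (rfl | ht), h1, h2⟩)
        · exact Or.inl h
        · exact absurd rfl h1
        · exact Or.inr ⟨t, ht, h1, h2⟩
    · rw [if_pos hs]
      constructor
      · rintro (h | ⟨t, ht, h1, h2⟩)
        · by_cases hg : lcpL r s > acc
          · rw [if_pos hg] at h
            exact Or.inr ⟨s, Or.inl rfl, hs, h⟩
          · rw [if_neg hg] at h
            exact Or.inl h
        · exact Or.inr ⟨t, Or.inr ht, h1, h2⟩
      · rintro (h | ⟨t, (rfl | ht), h1, h2⟩)
        · left; split <;> omega
        · left; split <;> omega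
        · exact Or.inr ⟨t, ht, h1, h2⟩

-- the loop's value, given the condition is "off ≤ M"
theorem aLoop_char (c : List Char) (others : List (List Char)) (M : Nat)
    (hM : M ≤ c.length)
    (hcond : ∀ o, 1 ≤ o → ((pySuffix c o ∈ others.map (fun x => pySuffix x o)) ↔ o ≤ M)) :
    ∀ fuel off, 1 ≤ off → c.length + 1 - off ≤ fuel →
      aLoop c others off fuel = if off ≤ M then min (M + 1) c.length else off := by
  intro fuel
  induction fuel with
  | zero =>
    intro off h1 hf
    have hlt : c.length < off := by omega
    rw [if_neg (by omega)]
    rfl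
  | succ fuel ih =>
    intro off h1 hf
    rw [aLoop]
    by_cases hc : off ≤ M
    · rw [if_pos ((hcond off h1).2 hc), if_pos hc]
      by_cases hlen : off + 1 > c.length
      · rw [if_pos hlen]; omega
      · rw [if_neg hlen, ih (off + 1) (by omega) (by omega)]
        by_cases h2 : off + 1 ≤ M
        · rw [if_pos h2]
        · rw [if_neg h2]; omega
    · rw [if_neg (fun h => hc ((hcond off h1).1 h)), if_neg hc]

-- per-element equality of the two ports' bodies
theorem per_element (codes : List String) (c : List Char) :
    String.mk (pySuffix c
      (aLoop c ((codes.map String.toList).filter (fun x => !(x == c))) 1 (c.length + 1))) =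
    String.mk (((c.reverse).take
      (min (((codes.map (fun s => s.toList.reverse)).foldl
        (fun m s => if s ≠ c.reverse then (if lcpL c.reverse s > m then lcpL c.reverse s else m) else m) 0) + 1)
        (c.reverse).length)).reverse) := by
  set r := c.reverse with hr
  set M := (codes.map (fun s => s.toList.reverse)).foldl
      (fun m s => if s ≠ r then (if lcpL r s > m then lcpL r s else m) else m) 0 with hMdef
  have hchar : ∀ off, off ≤ M ↔ off ≤ 0 ∨ ∃ y ∈ codes, y.toList ≠ c ∧ off ≤ lcpL r y.toList.reverse := by
    intro off
    rw [hMdef, fold_char]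
    simp only [List.mem_map]
    constructor
    · rintro (h | ⟨s, ⟨y, hy, rfl⟩, hne, hle⟩)
      · exact Or.inl h
      · exact Or.inr ⟨y, hy, fun hh => hne (by rw [hh, hr]), hle⟩
    · rintro (h | ⟨y, hy, hne, hle⟩)
      · exact Or.inl h
      · exact Or.inr ⟨y.toList.reverse, ⟨y, hy, rfl⟩,
          fun hh => hne (by rw [hr] at hh; exact List.reverse_injective hh), hle⟩
  have hM : M ≤ c.length := by
    rcases Nat.eq_zero_or_pos M with h0 | hpos
    · omega
    · rcases (hchar M).1 le_rfl with h | ⟨y, _, _, hle⟩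
      · omega
      · have h2 := lcpL_le_left r y.toList.reverse
        have h3 : r.length = c.length := by rw [hr]; simp
        omega
  have hcond : ∀ o, 1 ≤ o → ((pySuffix c o ∈ ((codes.map String.toList).filter (fun x => !(x == c))).map (fun x => pySuffix x o)) ↔ o ≤ M) := by
    intro o ho
    rw [cond_iff]
    constructor
    · rintro ⟨y, hy, hne, hle⟩
      simp only [List.mem_map] at hy
      obtain ⟨z, hz, rfl⟩ := hy
      exact (hchar o).2 (Or.inr ⟨z, hz, hne, by rw [hr]; exact hle⟩)
    · intro h
      rcases (hchar o).1 h with h0 | ⟨y, hy, hne, hle⟩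
      · omega
      · exact ⟨y.toList, List.mem_map_of_mem hy, hne, by rw [← hr]; exact hle⟩
  have hloop := aLoop_char c ((codes.map String.toList).filter (fun x => !(x == c))) M hM hcond
    (c.length + 1) 1 le_rfl (by omega)
  rw [hloop]
  congr 1
  rw [pySuffix_eq_rev, ← hr]
  congr 1
  have hrlen : r.length = c.length := by rw [hr]; simp
  by_cases h1M : 1 ≤ M
  · rw [if_pos h1M, hrlen]
  · rw [if_neg h1M]
    have hM0 : M = 0 := by omega
    rw [hM0, hrlen]
    rcases Nat.eq_zero_or_pos c.length with hl | hl
    · have : r = [] := by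
        have := hrlen; rw [hl] at this; exact List.length_eq_zero_iff.1 this
      rw [this]; simp
    · have : min (0 + 1) c.length = 1 := by omega
      rw [this]

-- ===== VERDICT (by name: the statement is the Claim_ definition above) =====
theorem min_codes_py_spec : Claim_equal_min_codes_py := by
  intro codes _
  unfold Spec_min_codes_py
  show min_codes_py codes = min_codes_py_alt codes
  simp only [min_codes_py, min_codes_py_alt, List.map_map]
  apply List.map_congr_left
  intro s _
  simpa using per_element codes s.toList
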